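-- pv_equiv track=rewrite | github.com/Wang-Yu-Qing/MIND | utils.py | encode_users
-- ===== SOURCE A (Python) =====
-- def encode_users(valid_users):
--     encoder, decoder = {}, []
--     encode_id = 0
--     for user_id in valid_users:
--         if user_id not in encoder:
--             encoder[user_id] = encode_id
--             decoder.append(user_id)
--             encode_id += 1
--
--     return encoder, decoder
-- ===== SOURCE B (Python) =====
-- def encode_users(valid_users):
--     first_pos = {}
--     for i, user_id in reversed(list(enumerate(valid_users))):
--         first_pos[user_id] = i
--     decoder = sorted(first_pos, key=first_pos.get)
--     encoder = {user_id: rank for rank, user_id in enumerate(decoder)}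
--     return encoder, decoder
-- ===== Notes on version B (the rewrite author's own statement) =====
-- stated objective: alternative
-- what changed: Replaces A's single membership-test-plus-counter loop by a sort-based algorithm: a backward scan overwrites a position table so every user ends up mapped to its first-occurrence index, the unique users are then sorted by that position to form the decoder, and a final enumeration assigns the ranks.
import Mathlib
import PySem

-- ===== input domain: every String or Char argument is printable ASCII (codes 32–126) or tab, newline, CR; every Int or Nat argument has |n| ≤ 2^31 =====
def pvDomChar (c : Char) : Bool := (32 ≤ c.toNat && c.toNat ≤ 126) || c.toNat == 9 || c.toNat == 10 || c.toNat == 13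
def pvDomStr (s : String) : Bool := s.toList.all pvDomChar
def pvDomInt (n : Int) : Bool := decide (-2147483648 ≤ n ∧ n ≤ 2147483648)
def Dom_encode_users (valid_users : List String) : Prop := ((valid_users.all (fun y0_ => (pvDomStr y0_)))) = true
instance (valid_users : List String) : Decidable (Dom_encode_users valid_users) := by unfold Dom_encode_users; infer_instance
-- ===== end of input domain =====

-- B replaces A's membership-test-plus-counter loop by a sort-based algorithm (backward position
-- table, then sort unique users by first-occurrence position); alternative, same result.

-- ===== PORT A =====
def encode_users (valid_users : List String) : (List (String × Int)) × List String :=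
  let final := valid_users.foldl
    (fun (st : PySem.Dict String Int × List String × Int) user_id =>
      if st.1.contains user_id = false then
        (st.1.insert user_id st.2.2, st.2.1 ++ [user_id], st.2.2 + 1)
      else st)
    (PySem.Dict.empty, ([] : List String), (0 : Int))
  (final.1.items, final.2.1)

-- ===== PORT B =====
def encode_users_alt (valid_users : List String) : (List (String × Int)) × List String :=
  let first_pos := ((PySem.List.enumerate valid_users 0).reverse).foldl
    (fun (d : PySem.Dict String Int) p => d.insert p.2 p.1) PySem.Dict.empty
  let decoder := PySem.List.sorted first_pos.keys (fun u => first_pos.getD u 0) false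
  let encoder := (PySem.List.enumerate decoder 0).map (fun p => (p.2, p.1))
  (encoder, decoder)

-- ===== PRECONDITION & SPEC =====
def Spec_encode_users (valid_users : List String) (out : (List (String × Int)) × List String) : Prop := out = encode_users_alt valid_users
instance (valid_users : List String) (out : (List (String × Int)) × List String) : Decidable (Spec_encode_users valid_users out) := by unfold Spec_encode_users; infer_instance

-- ===== CLAIM (what is proved, stated in full; the proofs are below) =====
def Claim_equal_encode_users : Prop := ∀ (valid_users : List String), Dom_encode_users valid_users → Spec_encode_users valid_users (encode_users valid_users)

-- ===== LEMMAS AND PROOFS =====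

-- ---- A-side: A's loop state is determined by the ordered-dedup of the processed prefix ----

theorem enumerate_append_singleton (xs : List String) (u : String) (s : Int) :
    PySem.List.enumerate (xs ++ [u]) s = PySem.List.enumerate xs s ++ [(s + xs.length, u)] := by
  induction xs generalizing s with
  | nil => simp [PySem.List.enumerate_cons, PySem.List.enumerate_nil]
  | cons x t ih =>
      simp only [List.cons_append, PySem.List.enumerate_cons, ih, List.length_cons]
      push_cast
      ring_nf

theorem any_enum (dec : List String) (u : String) (s : Int) :
    (PySem.List.enumerate dec s).any (fun p => p.2 == u) = decide (u ∈ dec) := by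
  induction dec generalizing s with
  | nil => simp [PySem.List.enumerate_nil]
  | cons x t ih =>
      simp only [PySem.List.enumerate_cons, List.any_cons, ih, List.mem_cons]
      by_cases hx : u = x
      · simp [hx]
      · have hb : (x == u) = false := by
          simp only [beq_eq_false_iff_ne, ne_eq]
          exact fun h => hx h.symm
        simp [hb, hx]

theorem contains_mkEnc (dec : List String) (u : String) :
    (PySem.Dict.mk ((PySem.List.enumerate dec).map (fun p => (p.2, p.1)))).contains u
      = decide (u ∈ dec) := by
  have h := any_enum dec u 0
  simpa [PySem.Dict.contains, List.any_map, Function.comp] using h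

theorem exists_mem_enum (dec : List String) (x : String) :
    ∀ s : Int, x ∈ dec → ∃ i, (i, x) ∈ PySem.List.enumerate dec s := by
  induction dec with
  | nil => intro s h; cases h
  | cons y t ih =>
      intro s h
      rcases List.mem_cons.mp h with rfl | hm
      · exact ⟨s, by simp [PySem.List.enumerate_cons]⟩
      · rcases ih (s + 1) hm with ⟨i, hi⟩
        exact ⟨i, by simp [PySem.List.enumerate_cons, hi]⟩

theorem mem_of_mem_enum (dec : List String) (p : Int × String) :
    ∀ s : Int, p ∈ PySem.List.enumerate dec s → p.2 ∈ dec := by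
  induction dec with
  | nil => intro s h; simp [PySem.List.enumerate_nil] at h
  | cons y t ih =>
      intro s h
      rw [PySem.List.enumerate_cons] at h
      rcases List.mem_cons.mp h with rfl | hm
      · simp
      · exact List.mem_cons_of_mem _ (ih (s + 1) hm)

theorem loop_inv (xs : List String) (dec : List String) :
    xs.foldl
      (fun (st : PySem.Dict String Int × List String × Int) user_id =>
        if st.1.contains user_id = false then
          (st.1.insert user_id st.2.2, st.2.1 ++ [user_id], st.2.2 + 1)
        else st)
      (PySem.Dict.mk ((PySem.List.enumerate dec).map (fun p => (p.2, p.1))), dec, (dec.length : Int))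
    = (PySem.Dict.mk ((PySem.List.enumerate (xs.foldl PySem.Set.add dec)).map (fun p => (p.2, p.1))),
       xs.foldl PySem.Set.add dec, ((xs.foldl PySem.Set.add dec).length : Int)) := by
  induction xs generalizing dec with
  | nil => simp
  | cons x t ih =>
      simp only [List.foldl_cons]
      by_cases hx : x ∈ dec
      · have h1 : PySem.Set.add dec x = dec := by
          simp [PySem.Set.add, PySem.Set.contains, hx]
        rw [if_neg (by simp; exact exists_mem_enum dec x 0 hx), h1]
        exact ih dec
      · have h1 : PySem.Set.add dec x = dec ++ [x] := by
          simp [PySem.Set.add, PySem.Set.contains, hx]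
        have h2 : (PySem.Dict.mk ((PySem.List.enumerate dec).map (fun p => (p.2, p.1)))).insert x
              (dec.length : Int)
            = PySem.Dict.mk ((PySem.List.enumerate (dec ++ [x])).map (fun p => (p.2, p.1))) := by
          unfold PySem.Dict.insert
          rw [contains_mkEnc]
          simp [hx, enumerate_append_singleton]
        have h3 : (dec.length : Int) + 1 = (((dec ++ [x]).length : Nat) : Int) := by
          simp
        rw [if_pos (by
              simp
              intro a b hab hbx
              exact hx (hbx ▸ mem_of_mem_enum dec (a, b) 0 hab)),
            h2, h3, h1]
        exact ih (dec ++ [x])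

-- A in closed form: the dict of (user, first-seen rank) pairs and the ordered dedup
theorem encode_users_closed (l : List String) :
    encode_users l =
      ((PySem.List.enumerate (PySem.List.dedup l) 0).map (fun p => (p.2, p.1)),
       PySem.List.dedup l) := by
  unfold encode_users
  have h := loop_inv l []
  simp only [PySem.List.enumerate_nil, List.map_nil, List.length_nil, Nat.cast_zero] at h
  rw [PySem.List.dedup_eq_ofList, PySem.Set.ofList_eq_foldl]
  exact congrArg (fun st : PySem.Dict String Int × List String × Int => (st.1.items, st.2.1)) h

-- ---- B-side: the backward-built position table maps each user to its first-occurrence index ----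

theorem fp_get? (l : List String) : ∀ (s : Int) (u : String),
    (((PySem.List.enumerate l s).reverse).foldl
        (fun (d : PySem.Dict String Int) p => d.insert p.2 p.1) PySem.Dict.empty).get? u
      = if u ∈ l then some (s + (l.idxOf u : Int)) else none := by
  induction l with
  | nil => intro s u; simp [PySem.List.enumerate_nil, PySem.Dict.get?_empty]
  | cons x t ih =>
      intro s u
      rw [PySem.List.enumerate_cons, List.reverse_cons, List.foldl_append]
      simp only [List.foldl_cons, List.foldl_nil]
      rw [PySem.Dict.get?_insert]
      by_cases hu : u = x
      · subst hu
        simp [List.idxOf_cons_self]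
      · rw [if_neg hu, ih (s + 1) u]
        by_cases hm : u ∈ t
        · rw [if_pos hm, if_pos (List.mem_cons_of_mem _ hm)]
          rw [List.idxOf_cons_ne t (fun h => hu h.symm)]
          push_cast
          ring_nf
        · rw [if_neg hm, if_neg (by simp [hu, hm])]

theorem fp_keys_mem (l : List String) (u : String) :
    (u ∈ (((PySem.List.enumerate l 0).reverse).foldl
        (fun (d : PySem.Dict String Int) p => d.insert p.2 p.1) PySem.Dict.empty).keys) ↔ u ∈ l := by
  constructor
  · intro hk
    by_contra hm
    have h := fp_get? l 0 u
    rw [if_neg hm] at h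
    exact ((PySem.Dict.get?_eq_none_iff_not_mem_keys _ u).mp h) hk
  · intro hm
    by_contra hk
    have h := (PySem.Dict.get?_eq_none_iff_not_mem_keys _ u).mpr hk
    rw [fp_get? l 0 u, if_pos hm] at h
    simp at h

theorem fp_keys_nodup (l : List String) :
    (((PySem.List.enumerate l 0).reverse).foldl
        (fun (d : PySem.Dict String Int) p => d.insert p.2 p.1) PySem.Dict.empty).keys.Nodup := by
  exact PySem.Dict.nodup_keys_foldl_insert_key ((PySem.List.enumerate l 0).reverse)
    (fun (p : Int × String) => p.2) (fun _ (p : Int × String) => p.1) PySem.Dict.empty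
    (by simp [PySem.Dict.keys_empty])

-- ordered dedup peels its head by filtering the head's duplicates out of the tail
theorem foldl_add_filter (t : List String) : ∀ (dec : List String) (x : String), x ∈ dec →
    t.foldl PySem.Set.add dec = (t.filter (fun u => u != x)).foldl PySem.Set.add dec := by
  induction t with
  | nil => intro dec x _; rfl
  | cons y t' ih =>
      intro dec x hx
      rw [List.filter_cons]
      by_cases hyx : y = x
      · subst hyx
        have h1 : PySem.Set.add dec y = dec := by
          simp [PySem.Set.add, PySem.Set.contains, hx]
        simp only [bne_self_eq_false, List.foldl_cons, h1]
        exact ih dec y hx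
      · have hb : (y != x) = true := by simp [hyx]
        simp only [hb, List.foldl_cons]
        exact ih (PySem.Set.add dec y) x ((PySem.Set.mem_add dec y x).mpr (Or.inl hx))

theorem foldl_add_cons (s : List String) : ∀ (dec : List String) (x : String), x ∉ s →
    s.foldl PySem.Set.add (x :: dec) = x :: s.foldl PySem.Set.add dec := by
  induction s with
  | nil => intro dec x _; rfl
  | cons y s' ih =>
      intro dec x hxs
      have hyx : y ≠ x := fun h => hxs (h ▸ List.mem_cons_self)
      have hxs' : x ∉ s' := fun h => hxs (List.mem_cons_of_mem _ h)
      have hstep : PySem.Set.add (x :: dec) y = x :: PySem.Set.add dec y := by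
        by_cases hyd : y ∈ dec
        · simp [PySem.Set.add, PySem.Set.contains, hyd]
        · simp [PySem.Set.add, PySem.Set.contains, hyd, hyx]
      simp only [List.foldl_cons, hstep]
      exact ih (PySem.Set.add dec y) x hxs' 

theorem dedup_cons_filter (x : String) (t : List String) :
    PySem.List.dedup (x :: t) = x :: PySem.List.dedup (t.filter (fun u => u != x)) := by
  have hxf : x ∉ t.filter (fun u => u != x) := by
    intro h
    have := List.of_mem_filter h
    simp at this
  rw [PySem.List.dedup_eq_ofList, PySem.List.dedup_eq_ofList,
      PySem.Set.ofList_eq_foldl, PySem.Set.ofList_eq_foldl]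
  have h0 : PySem.Set.add ([] : List String) x = [x] := by
    simp [PySem.Set.add, PySem.Set.contains]
  rw [List.foldl_cons, h0]
  rw [foldl_add_filter t [x] x List.mem_cons_self]
  exact foldl_add_cons (t.filter (fun u => u != x)) [] x hxf

-- filtering preserves the relative order of first occurrences
theorem idxOf_filter_mono (p : String → Bool) (t : List String) : ∀ (a b : String),
    a ∈ t.filter p → b ∈ t.filter p →
    (t.filter p).idxOf a < (t.filter p).idxOf b → t.idxOf a < t.idxOf b := by
  induction t with
  | nil => intro a b ha _ _; simp at ha
  | cons y t' ih =>
      intro a b ha hb hlt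
      rw [List.filter_cons] at ha hb hlt
      by_cases hpy : p y = true
      · simp only [hpy, if_true] at ha hb hlt
        by_cases hby : b = y
        · subst hby
          rw [List.idxOf_cons_self] at hlt
          omega
        · have hbm : b ∈ t'.filter p := by
            rcases List.mem_cons.mp hb with h | h
            · exact absurd h hby
            · exact h
          rw [List.idxOf_cons_ne _ (fun h => hby h.symm)] at hlt
          rw [List.idxOf_cons_ne t' (fun h => hby h.symm)]
          by_cases hay : a = y
          · subst hay
            rw [List.idxOf_cons_self] at hlt ⊢
            omega
          · have ham : a ∈ t'.filter p := by
              rcases List.mem_cons.mp ha with h | h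
              · exact absurd h hay
              · exact h
            rw [List.idxOf_cons_ne _ (fun h => hay h.symm)] at hlt
            rw [List.idxOf_cons_ne t' (fun h => hay h.symm)]
            have := ih a b ham hbm (by omega)
            omega
      · simp only [Bool.not_eq_true] at hpy
        simp only [hpy] at ha hb hlt
        have hay : a ≠ y := fun h => by
          have := List.of_mem_filter ha
          rw [h] at this
          rw [this] at hpy
          exact Bool.noConfusion hpy
        have hby : b ≠ y := fun h => by
          have := List.of_mem_filter hb
          rw [h] at this
          rw [this] at hpy
          exact Bool.noConfusion hpy
        rw [List.idxOf_cons_ne t' (fun h => hay h.symm),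
            List.idxOf_cons_ne t' (fun h => hby h.symm)]
        have := ih a b ha hb hlt
        omega

-- the ordered dedup lists users in strictly increasing order of first occurrence
theorem dedup_pairwise_idxOf (n : Nat) : ∀ (l : List String), l.length ≤ n →
    (PySem.List.dedup l).Pairwise (fun a b => l.idxOf a < l.idxOf b) := by
  induction n with
  | zero =>
      intro l hl
      have : l = [] := List.length_eq_zero_iff.mp (Nat.le_zero.mp hl)
      subst this
      simp [PySem.List.dedup]
  | succ n ih =>
      intro l hl
      match l with
      | [] => simp [PySem.List.dedup]
      | x :: t =>
          rw [dedup_cons_filter]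
          have hlen : (t.filter (fun u => u != x)).length ≤ n :=
            le_trans (List.length_filter_le _ _) (Nat.le_of_succ_le_succ hl)
          refine List.Pairwise.cons ?_ ?_
          · intro b hb
            have hbf : b ∈ t.filter (fun u => u != x) :=
              (PySem.List.mem_dedup _ b).mp hb
            have hbx : b ≠ x := by
              have := List.of_mem_filter hbf
              simpa using this
            rw [List.idxOf_cons_self, List.idxOf_cons_ne t (fun h => hbx h.symm)]
            omega
          · have hp := ih (t.filter (fun u => u != x)) hlen
            refine hp.imp_of_mem ?_
            intro a b ha hb hab
            have haf : a ∈ t.filter (fun u => u != x) := (PySem.List.mem_dedup _ a).mp ha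
            have hbf : b ∈ t.filter (fun u => u != x) := (PySem.List.mem_dedup _ b).mp hb
            have hax : a ≠ x := by have := List.of_mem_filter haf; simpa using this
            have hbx : b ≠ x := by have := List.of_mem_filter hbf; simpa using this
            have := idxOf_filter_mono _ t a b haf hbf hab
            rw [List.idxOf_cons_ne t (fun h => hax h.symm),
                List.idxOf_cons_ne t (fun h => hbx h.symm)]
            omega

theorem alt_closed (l : List String) :
    encode_users_alt l =
      ((PySem.List.enumerate (PySem.List.dedup l) 0).map (fun p => (p.2, p.1)),
       PySem.List.dedup l) := by
  dsimp only [encode_users_alt]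
  have hperm : (PySem.List.dedup l).Perm
      ((((PySem.List.enumerate l 0).reverse).foldl
        (fun (d : PySem.Dict String Int) p => d.insert p.2 p.1) PySem.Dict.empty).keys) := by
    rw [List.perm_ext_iff_of_nodup (PySem.List.nodup_dedup l) (fp_keys_nodup l)]
    intro a
    rw [PySem.List.mem_dedup, fp_keys_mem]
  have hpw : (PySem.List.dedup l).Pairwise (fun a b =>
      (((PySem.List.enumerate l 0).reverse).foldl
        (fun (d : PySem.Dict String Int) p => d.insert p.2 p.1) PySem.Dict.empty).getD a 0 <
      (((PySem.List.enumerate l 0).reverse).foldl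
        (fun (d : PySem.Dict String Int) p => d.insert p.2 p.1) PySem.Dict.empty).getD b 0) := by
    refine (dedup_pairwise_idxOf l.length l le_rfl).imp_of_mem ?_
    intro a b ha hb hab
    have ham : a ∈ l := (PySem.List.mem_dedup l a).mp ha
    have hbm : b ∈ l := (PySem.List.mem_dedup l b).mp hb
    have hga : (((PySem.List.enumerate l 0).reverse).foldl
        (fun (d : PySem.Dict String Int) p => d.insert p.2 p.1) PySem.Dict.empty).getD a 0
        = (l.idxOf a : Int) := by
      refine PySem.Dict.getD_of_get?_eq_some _ _ ?_
      rw [fp_get? l 0 a, if_pos ham]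
      norm_num
    have hgb : (((PySem.List.enumerate l 0).reverse).foldl
        (fun (d : PySem.Dict String Int) p => d.insert p.2 p.1) PySem.Dict.empty).getD b 0
        = (l.idxOf b : Int) := by
      refine PySem.Dict.getD_of_get?_eq_some _ _ ?_
      rw [fp_get? l 0 b, if_pos hbm]
      norm_num
    rw [hga, hgb]
    exact_mod_cast hab
  rw [PySem.List.sorted_eq_of_perm_of_pairwise_lt _ _ _ hperm hpw]

-- ===== VERDICT (by name: the statement is the Claim_ definition above) =====
theorem encode_users_spec : Claim_equal_encode_users := by
  intro l _
  unfold Spec_encode_users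
  rw [encode_users_closed, alt_closed]
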